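-- pv_equiv track=rewrite | github.com/AlexeyDmitrich/python_introduction | seminar2/homeTask3optional.py | proof
-- ===== SOURCE A (Python) =====
-- def proof (predicates_left, predicates_right):
--     conunction = False # True
--     disunction = False # True
--
--     for predicat in predicates_left:
--         if (not(predicat == True)):   # ни один предикат не true
--             disunction = True
--             continue
--         else:
--             disunction = False       # если попадется предикат - true, вернём фолс
--     for predicat in predicates_right:
--         if ((not predicat) == True):   # каждый непредикат обязательно true
--             conunction = True
--             continue
--         else:
--             conunction = False   # если хотя бы один непредикат - false, возвращаем фолс
--
--     truthfulness = False
--     if conunction == disunction: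
--         truthfulness = True
--     return truthfulness
--
--     '''
--     Кажется, я что-то упускаю. На одиночной проверке показатель времени был выше, чем в цикле из 100 проверок.
--     '''
-- ===== SOURCE B (Python) =====
-- def proof(predicates_left, predicates_right):
--     # Only the last element of each list can matter: the loop flags are
--     # overwritten on every iteration. Compute them directly.
--     d = bool(predicates_left) and predicates_left[-1] != True
--     c = bool(predicates_right) and not predicates_right[-1]
--     return d == c
-- ===== Notes on version B (the rewrite author's own statement) =====
-- stated objective: simpler
-- what changed: Both loops only keep the flag from their final iteration, so B drops the loops entirely and computes each flag from the last list element (False for an empty list) in O(1).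
import Mathlib
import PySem

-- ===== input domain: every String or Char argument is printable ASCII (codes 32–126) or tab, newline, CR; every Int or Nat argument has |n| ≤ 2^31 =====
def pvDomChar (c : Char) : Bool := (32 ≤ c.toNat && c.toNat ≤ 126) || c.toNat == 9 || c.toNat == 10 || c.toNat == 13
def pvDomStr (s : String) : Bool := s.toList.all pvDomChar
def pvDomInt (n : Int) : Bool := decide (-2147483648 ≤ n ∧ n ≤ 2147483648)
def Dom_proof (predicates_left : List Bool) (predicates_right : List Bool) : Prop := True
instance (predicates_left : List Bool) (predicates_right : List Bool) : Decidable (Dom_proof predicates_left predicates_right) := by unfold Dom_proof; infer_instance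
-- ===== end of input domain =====

-- B drops both flag-overwriting loops and computes each flag in O(1) from the last list element (simpler); return values proved equal.

-- ===== PORT A =====
-- two folds, each carrying the overwritten flag exactly as A's loops do
def proof (predicates_left : List Bool) (predicates_right : List Bool) : Bool :=
  let disunction := predicates_left.foldl (fun _ predicat => if ¬ (predicat == true) then true else false) false
  let conunction := predicates_right.foldl (fun _ predicat => if (!predicat) == true then true else false) false
  let truthfulness := false
  if conunction == disunction then true else truthfulness

-- ===== PORT B =====
-- 'bool(l) and l[-1] != True' / 'bool(l) and not l[-1]': the guarded last lookup is Option-valued (none = empty list → False)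
def proof_alt (predicates_left : List Bool) (predicates_right : List Bool) : Bool :=
  let d := match predicates_left.getLast? with
           | none => false
           | some x => x != true
  let c := match predicates_right.getLast? with
           | none => false
           | some x => !x
  d == c

-- ===== PRECONDITION & SPEC =====
def Spec_proof (predicates_left : List Bool) (predicates_right : List Bool) (out : Bool) : Prop := out = proof_alt predicates_left predicates_right
instance (predicates_left : List Bool) (predicates_right : List Bool) (out : Bool) : Decidable (Spec_proof predicates_left predicates_right out) := by unfold Spec_proof; infer_instance

-- ===== CLAIM (what is proved, stated in full; the proofs are below) =====
def Claim_equal_proof : Prop := ∀ (predicates_left : List Bool) (predicates_right : List Bool), Dom_proof predicates_left predicates_right → Spec_proof predicates_left predicates_right (proof predicates_left predicates_right)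

-- ===== LEMMAS AND PROOFS =====
-- a fold whose step ignores the accumulator returns the step applied to the last element (or the seed on [])
theorem foldl_const_step (f : Bool → Bool) (b : Bool) (l : List Bool) :
    l.foldl (fun _ p => f p) b = match l.getLast? with | none => b | some x => f x := by
  induction l generalizing b with
  | nil => rfl
  | cons x xs ih =>
    cases xs with
    | nil => simp [List.foldl]
    | cons y ys => simpa [List.foldl, List.getLast?_cons_cons] using ih (f x)

-- ===== VERDICT (by name: the statement is the Claim_ definition above) =====
theorem proof_spec : Claim_equal_proof := by
  intro l r _
  unfold Spec_proof proof proof_alt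
  rw [foldl_const_step (fun p => if ¬ (p == true) then true else false) false l,
      foldl_const_step (fun p => if (!p) == true then true else false) false r]
  cases l.getLast? with
  | none => cases r.getLast? with
    | none => rfl
    | some y => cases y <;> rfl
  | some x => cases r.getLast? with
    | none => cases x <;> rfl
    | some y => cases x <;> cases y <;> rfl
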